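-- pv_equiv track=rewrite | github.com/CodingThrust/problem-reductions | docs/paper/verify-reductions/verify_three_partition_dynamic_storage_allocation.py | solve_dsa
-- ===== SOURCE A (Python) =====
-- from typing import Optional
--
-- def solve_dsa(
--     items: list[tuple[int, int, int]], memory_size: int
-- ) -> Optional[list[int]]:
--     """
--     Brute-force solve DynamicStorageAllocation.
--     Returns list of starting addresses or None.
--     """
--     n = len(items)
--     if n == 0:
--         return []
--
--     def backtrack(idx, config):
--         if idx == n:
--             return config[:]
--         arrival, departure, size = items[idx]
--         max_addr = memory_size - size
--         for addr in range(max_addr + 1):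
--             conflict = False
--             for j in range(idx):
--                 r_j, d_j, s_j = items[j]
--                 sigma_j = config[j]
--                 if arrival < d_j and r_j < departure:
--                     if not (addr + size <= sigma_j or sigma_j + s_j <= addr):
--                         conflict = True
--                         break
--             if not conflict:
--                 config.append(addr)
--                 result = backtrack(idx + 1, config)
--                 if result is not None:
--                     return result
--                 config.pop()
--         return None
--
--     return backtrack(0, [])
-- ===== SOURCE B (Python) =====
-- from typing import Optional
--
-- def solve_dsa(
--     items: list[tuple[int, int, int]], memory_size: int
-- ) -> Optional[list[int]]:
--     """
--     Brute-force solve DynamicStorageAllocation, skipping over blocked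
--     address ranges: when an address conflicts with an already-placed item,
--     jump directly past that item (addr = sigma_j + s_j) instead of
--     re-testing every intermediate address one by one.
--     """
--     if not items:
--         return []
--
--     def place(config, rest):
--         if not rest:
--             return list(config)
--         (arrival, departure, size) = rest[0]
--         tail = rest[1:]
--         limit = memory_size - size
--         addr = 0
--         while addr <= limit:
--             nxt = None
--             for (r, d, s), sig in zip(items, config):
--                 if arrival < d and r < departure and addr + size > sig and addr < sig + s:
--                     nxt = sig + s
--                     break
--             if nxt is not None:
--                 addr = nxt
--             else:
--                 res = place(config + [addr], tail)
--                 if res is not None: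
--                     return res
--                 addr += 1
--         return None
--
--     return place([], items)
-- ===== Notes on version B (the rewrite author's own statement) =====
-- stated objective: alternative
-- what changed: B replaces A's address-by-address scan (try every addr in 0..memory_size-size, re-running the full conflict loop at each) with a jump scan: the conflict check returns the end of the first blocking placed item and B resumes the search directly at that address, skipping the whole blocked range at once; the conflict test runs over zip(items, config) instead of an indexed loop.
import Mathlib
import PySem

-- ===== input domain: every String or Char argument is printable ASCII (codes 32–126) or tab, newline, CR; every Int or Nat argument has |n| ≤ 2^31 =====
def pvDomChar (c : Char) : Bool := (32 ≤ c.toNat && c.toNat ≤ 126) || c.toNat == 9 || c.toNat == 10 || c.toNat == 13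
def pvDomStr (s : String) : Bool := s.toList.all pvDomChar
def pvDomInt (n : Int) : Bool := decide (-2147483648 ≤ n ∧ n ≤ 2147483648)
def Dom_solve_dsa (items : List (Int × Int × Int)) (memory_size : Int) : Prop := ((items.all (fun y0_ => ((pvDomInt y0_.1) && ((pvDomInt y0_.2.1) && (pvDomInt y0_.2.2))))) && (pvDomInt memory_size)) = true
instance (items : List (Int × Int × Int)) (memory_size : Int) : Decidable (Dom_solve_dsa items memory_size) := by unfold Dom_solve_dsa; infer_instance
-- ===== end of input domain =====

-- B changes A's per-address linear probe into a jump scan that skips each blocked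
-- address range in one step (objective: alternative decomposition, same results).

-- ===== PORT A =====
-- A's inner loop 'for j in range(idx): r_j,d_j,s_j = items[j]; sigma_j = config[j]'
-- walks the placed prefix in order with early break; ported as recursion over
-- items.zip config (config has length idx, so zip is exactly that prefix).
def conflictA (arrival departure addr size : Int) :
    List ((Int × Int × Int) × Int) → Bool
  | [] => false
  | ((r_j, d_j, s_j), sigma_j) :: ps =>
    if arrival < d_j ∧ r_j < departure then
      if ¬ (addr + size ≤ sigma_j ∨ sigma_j + s_j ≤ addr) then true
      else conflictA arrival departure addr size ps
    else conflictA arrival departure addr size ps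

-- 'for addr in range(max_addr + 1)': Python's range is lazy, so the loop is ported
-- as a step-by-one recursion on addr (addr = 0, 1, …, max_addr), with k the loop body's
-- recursive call backtrack(idx+1, config+[addr]); 'continue' both on conflict and on
-- a failed recursive call, exactly as in A.
def tryA (memory_size size : Int) (conflict : Int → Bool)
    (k : Int → Option (List Int)) (addr : Int) : Option (List Int) :=
  if h0 : addr ≤ memory_size - size then
    if conflict addr then tryA memory_size size conflict k (addr + 1)
    else
      match k addr with
      | some r => some r
      | none => tryA memory_size size conflict k (addr + 1)
  else none
termination_by (memory_size - size + 1 - addr).toNat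
decreasing_by
  · omega
  · omega

-- backtrack(idx, config): recursion over the remaining items (rest = items[idx:])
def btA (items : List (Int × Int × Int)) (memory_size : Int)
    (config : List Int) : List (Int × Int × Int) → Option (List Int)
  | [] => some config
  | (arrival, departure, size) :: rest =>
    tryA memory_size size
      (fun addr => conflictA arrival departure addr size (items.zip config))
      (fun addr => btA items memory_size (config ++ [addr]) rest) 0
termination_by rest => rest.length

def solve_dsa (items : List (Int × Int × Int)) (memory_size : Int) : Option (List Int) :=
  if items.length = 0 then some [] else btA items memory_size [] items

-- ===== PORT B =====
-- first blocking placed item for this addr: returns sigma_j + s_j (resume point), none if free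
def conflictB (arrival departure addr size : Int) :
    List ((Int × Int × Int) × Int) → Option Int
  | [] => none
  | ((r, d, s), sig) :: ps =>
    if arrival < d ∧ r < departure ∧ addr + size > sig ∧ addr < sig + s then some (sig + s)
    else conflictB arrival departure addr size ps

-- used by loopB's termination proof: the jump target is strictly ahead
theorem conflictB_lt (arrival departure addr size : Int) :
    ∀ (ps : List ((Int × Int × Int) × Int)) (nxt : Int),
      conflictB arrival departure addr size ps = some nxt → addr < nxt := by
  intro ps
  induction ps with
  | nil => intro nxt h; simp [conflictB] at h
  | cons p ps ih =>
    obtain ⟨⟨r, d, s⟩, sig⟩ := p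
    intro nxt h
    simp only [conflictB] at h
    split_ifs at h with hc
    · injection h with h; omega
    · exact ih nxt h

-- the 'while addr <= limit' loop of place: jump on conflict, else try k (the
-- recursive placement of the tail) and advance by one on its failure
def loopB (items : List (Int × Int × Int))
    (memory_size arrival departure size : Int) (config : List Int)
    (k : Int → Option (List Int)) (addr : Int) : Option (List Int) :=
  if h0 : addr ≤ memory_size - size then
    match h : conflictB arrival departure addr size (items.zip config) with
    | some nxt => loopB items memory_size arrival departure size config k nxt
    | none =>
      match k addr with
      | some r => some r
      | none => loopB items memory_size arrival departure size config k (addr + 1)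
  else none
termination_by (memory_size - size + 1 - addr).toNat
decreasing_by
  · have := conflictB_lt arrival departure addr size _ nxt h; omega
  · omega

def btB (items : List (Int × Int × Int)) (memory_size : Int)
    (config : List Int) : List (Int × Int × Int) → Option (List Int)
  | [] => some config
  | (arrival, departure, size) :: rest =>
    loopB items memory_size arrival departure size config
      (fun addr => btB items memory_size (config ++ [addr]) rest) 0
termination_by rest => rest.length

def solve_dsa_alt (items : List (Int × Int × Int)) (memory_size : Int) : Option (List Int) :=
  if items.length = 0 then some [] else btB items memory_size [] items

-- ===== PRECONDITION & SPEC =====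
def Spec_solve_dsa (items : List (Int × Int × Int)) (memory_size : Int) (out : Option (List Int)) : Prop := out = solve_dsa_alt items memory_size
instance (items : List (Int × Int × Int)) (memory_size : Int) (out : Option (List Int)) : Decidable (Spec_solve_dsa items memory_size out) := by unfold Spec_solve_dsa; infer_instance

-- ===== CLAIM (what is proved, stated in full; the proofs are below) =====
def Claim_equal_solve_dsa : Prop := ∀ (items : List (Int × Int × Int)) (memory_size : Int), Dom_solve_dsa items memory_size → Spec_solve_dsa items memory_size (solve_dsa items memory_size)

-- ===== LEMMAS AND PROOFS =====

-- the two conflict tests agree (De Morgan on the overlap condition, same scan order)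
theorem conflictA_eq_isSome (arrival departure addr size : Int) :
    ∀ ps : List ((Int × Int × Int) × Int),
      conflictA arrival departure addr size ps
        = (conflictB arrival departure addr size ps).isSome := by
  intro ps
  induction ps with
  | nil => simp [conflictA, conflictB]
  | cons p ps ih =>
    obtain ⟨⟨r, d, s⟩, sig⟩ := p
    simp only [conflictA, conflictB]
    split_ifs with h1 h2 h3 <;> simp_all <;> omega

-- every address in [addr, nxt) is still blocked (by the same placed item)
theorem conflictB_skip (arrival departure size : Int) :
    ∀ (ps : List ((Int × Int × Int) × Int)) (addr nxt addr' : Int),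
      conflictB arrival departure addr size ps = some nxt →
      addr ≤ addr' → addr' < nxt →
      (conflictB arrival departure addr' size ps).isSome = true := by
  intro ps
  induction ps with
  | nil => intro addr nxt addr' h; simp [conflictB] at h
  | cons p ps ih =>
    obtain ⟨⟨r, d, s⟩, sig⟩ := p
    intro addr nxt addr' h h1 h2
    simp only [conflictB] at h ⊢
    split_ifs at h with hc
    · injection h with h
      split_ifs with hc'
      · simp
      · exact absurd ⟨hc.1, hc.2.1, by omega, by omega⟩ hc'
    · split_ifs with hc'
      · simp
      · exact ih addr nxt addr' h h1 h2

-- a blocked prefix [lo, hi) is skipped by the step-by-one probe without effect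
theorem tryA_skip (memory_size size : Int) (conflict : Int → Bool)
    (k : Int → Option (List Int)) :
    ∀ (n : ℕ) (lo hi : Int), (hi - lo).toNat = n → lo ≤ hi →
      (∀ x, lo ≤ x → x < hi → conflict x = true) →
      tryA memory_size size conflict k lo = tryA memory_size size conflict k hi := by
  intro n
  induction n with
  | zero =>
    intro lo hi hn hle _
    have : lo = hi := by omega
    subst this; rfl
  | succ m ih =>
    intro lo hi hn hle hall
    have hlt : lo < hi := by omega
    rw [tryA]
    by_cases h0 : lo ≤ memory_size - size
    · simp only [dif_pos h0, hall lo le_rfl hlt, if_true]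
      exact ih (lo + 1) hi (by omega) (by omega) (fun x hx1 hx2 => hall x (by omega) hx2)
    · simp only [dif_neg h0]
      rw [tryA]
      simp only [dif_neg (show ¬ hi ≤ memory_size - size by omega)]

-- the jump loop equals A's step-by-one probe over the same address range
theorem loop_eq (items : List (Int × Int × Int))
    (memory_size arrival departure size : Int) (config : List Int)
    (kA kB : Int → Option (List Int)) (hk : ∀ x, kA x = kB x) :
    ∀ (n : ℕ) (addr : Int), (memory_size - size + 1 - addr).toNat = n →
      loopB items memory_size arrival departure size config kB addr
        = tryA memory_size size
            (fun x => conflictA arrival departure x size (items.zip config)) kA addr := by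
  intro n
  induction n using Nat.strong_induction_on with
  | _ n ih =>
    intro addr hn
    rw [loopB, tryA]
    by_cases h0 : addr ≤ memory_size - size
    · simp only [dif_pos h0]
      rcases hcb : conflictB arrival departure addr size (items.zip config) with _ | nxt
      · -- free address: try the recursive call, else advance by one
        have hca : conflictA arrival departure addr size (items.zip config) = false := by
          rw [conflictA_eq_isSome, hcb]; rfl
        simp only [hca, if_neg Bool.false_ne_true, ← hk addr]
        rcases hkA : kA addr with _ | r
        · exact ih (memory_size - size + 1 - (addr + 1)).toNat (by omega) (addr + 1) rfl
        · rfl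
      · -- blocked: every address in [addr, nxt) is blocked, so the probe reaches nxt
        have hlt := conflictB_lt arrival departure addr size _ nxt hcb
        have hca : conflictA arrival departure addr size (items.zip config) = true := by
          rw [conflictA_eq_isSome, hcb]; rfl
        simp only [hca, if_true]
        rw [show tryA memory_size size
              (fun x => conflictA arrival departure x size (items.zip config)) kA (addr + 1)
            = tryA memory_size size
              (fun x => conflictA arrival departure x size (items.zip config)) kA nxt from
          tryA_skip memory_size size _ kA (nxt - (addr + 1)).toNat (addr + 1) nxt rfl (by omega)
            (fun x hx1 hx2 => by
              have := conflictB_skip arrival departure size (items.zip config) addr nxt x hcb (by omega) hx2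
              rw [conflictA_eq_isSome, this])]
        exact ih (memory_size - size + 1 - nxt).toNat (by omega) nxt rfl
    · simp only [dif_neg h0]

theorem btA_eq_btB (items : List (Int × Int × Int)) (memory_size : Int) :
    ∀ (rest : List (Int × Int × Int)) (config : List Int),
      btA items memory_size config rest = btB items memory_size config rest := by
  intro rest
  induction rest with
  | nil => intro config; simp [btA, btB]
  | cons it rest ih =>
    obtain ⟨arrival, departure, size⟩ := it
    intro config
    rw [btA, btB]
    rw [loop_eq items memory_size arrival departure size config
      (fun addr => btA items memory_size (config ++ [addr]) rest)
      (fun addr => btB items memory_size (config ++ [addr]) rest)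
      (fun x => ih (config ++ [x]))
      (memory_size - size + 1 - 0).toNat 0 rfl]

-- ===== VERDICT (by name: the statement is the Claim_ definition above) =====
theorem solve_dsa_spec : Claim_equal_solve_dsa := by
  intro items memory_size _
  unfold Spec_solve_dsa solve_dsa solve_dsa_alt
  by_cases h : items.length = 0
  · simp [h]
  · simp only [if_neg h]
    exact btA_eq_btB items memory_size items []
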